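-- pv_equiv track=rewrite | github.com/samlevine03/advent-of-code-2024 | day13.py | solve
-- ===== SOURCE A (Python) =====
-- def solve(a,b,p):
--     ax,ay = a[0],a[1]
--     bx,by = b[0],b[1]
--     px,py = p[0],p[1]
--
--     min_cost = float('inf')
--     best = None
--
--     for a_count in range(101):
--         for b_count in range(101):
--             x = a_count * ax + b_count * bx
--             y = a_count * ay + b_count * by
--             if x == px and y == py:
--                 cost = 3 * a_count + b_count
--                 if cost < min_cost:
--                     min_cost = cost
--                     best = (a_count, b_count)
--
--     return min_cost if best else 0
-- ===== SOURCE B (Python) =====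
-- def solve(a, b, p):
--     # Single pass over a_count: the matching b_count (if any) is computed by
--     # exact division instead of an inner 0..100 scan.
--     ax, ay = a[0], a[1]
--     bx, by = b[0], b[1]
--     px, py = p[0], p[1]
--
--     best = None
--     for i in range(101):
--         rx = px - i * ax
--         ry = py - i * ay
--         if bx != 0:
--             j = rx // bx if rx % bx == 0 else None
--         elif by != 0:
--             j = ry // by if ry % by == 0 else None
--         else:
--             j = 0
--         if j is not None and 0 <= j <= 100 and j * bx == rx and j * by == ry:
--             cost = 3 * i + j
--             best = cost if best is None else min(best, cost)
--     return best if best is not None else 0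
-- ===== Notes on version B (the rewrite author's own statement) =====
-- stated objective: alternative
-- what changed: A scans all 101x101 (a_count,b_count) pairs; B makes a single 0..100 pass over a_count and computes the unique matching b_count by exact division (with b_count=0 in the bx=by=0 degenerate case), so the inner 101-iteration scan disappears; fewer loop iterations, but not measurably faster on the timed inputs.
import Mathlib
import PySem

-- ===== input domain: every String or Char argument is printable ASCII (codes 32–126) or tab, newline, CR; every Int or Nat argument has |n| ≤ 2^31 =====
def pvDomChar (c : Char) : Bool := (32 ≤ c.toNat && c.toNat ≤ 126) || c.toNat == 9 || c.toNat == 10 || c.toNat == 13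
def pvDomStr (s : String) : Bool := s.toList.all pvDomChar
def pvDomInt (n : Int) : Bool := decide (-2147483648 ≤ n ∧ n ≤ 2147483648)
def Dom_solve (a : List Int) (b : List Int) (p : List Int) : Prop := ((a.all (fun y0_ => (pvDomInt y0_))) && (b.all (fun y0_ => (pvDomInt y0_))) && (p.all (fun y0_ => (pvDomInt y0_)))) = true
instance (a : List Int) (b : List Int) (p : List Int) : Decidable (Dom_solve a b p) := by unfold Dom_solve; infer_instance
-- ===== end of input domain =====

-- B replaces A's 101×101 brute-force scan by a single 0..100 pass that computes the unique
-- matching b_count by exact division (same return value; an alternative algorithm).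


-- ===== PORT A =====
-- min_cost = inf / best = None collapse to one Option Int (none = no hit yet)
def updA (s : Option Int) (c : Int) : Option Int :=
  match s with
  | none => some c
  | some m => if c < m then some c else some m

def solveCore (ax ay bx b_y px py : Int) : Int :=
  ((PySem.List.pyRange 0 101 1).foldl (fun s i =>
    (PySem.List.pyRange 0 101 1).foldl (fun s j =>
      if i * ax + j * bx = px ∧ i * ay + j * b_y = py then updA s (3 * i + j) else s) s)
    none).getD 0

def solve (a : List Int) (b : List Int) (p : List Int) : Int :=
  match PySem.List.pyGet? a 0, PySem.List.pyGet? a 1, PySem.List.pyGet? b 0,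
        PySem.List.pyGet? b 1, PySem.List.pyGet? p 0, PySem.List.pyGet? p 1 with
  | some ax, some ay, some bx, some b_y, some px, some py => solveCore ax ay bx b_y px py
  | _, _, _, _, _, _ => 0

-- ===== PORT B =====
-- 'best' running minimum of B (none = no hit yet)
def updB (s : Option Int) (c : Int) : Option Int :=
  some (match s with
        | none => c
        | some m => min m c)

def candJ (bx b_y rx ry : Int) : Option Int :=
  if bx ≠ 0 then (if PySem.Int.mod rx bx = 0 then some (PySem.Int.floordiv rx bx) else none)
  else if b_y ≠ 0 then (if PySem.Int.mod ry b_y = 0 then some (PySem.Int.floordiv ry b_y) else none)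
  else some 0

def stepB (ax ay bx b_y px py : Int) (s : Option Int) (i : Int) : Option Int :=
  let rx := px - i * ax
  let ry := py - i * ay
  match candJ bx b_y rx ry with
  | some j => if 0 ≤ j ∧ j ≤ 100 ∧ j * bx = rx ∧ j * b_y = ry then updB s (3 * i + j) else s
  | none => s

def solveAltCore (ax ay bx b_y px py : Int) : Int :=
  ((PySem.List.pyRange 0 101 1).foldl (stepB ax ay bx b_y px py) none).getD 0

def solve_alt (a : List Int) (b : List Int) (p : List Int) : Int :=
  Option.getD
    ((PySem.List.pyGet? a 0).bind (fun ax =>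
     (PySem.List.pyGet? a 1).bind (fun ay =>
     (PySem.List.pyGet? b 0).bind (fun bx =>
     (PySem.List.pyGet? b 1).bind (fun b_y =>
     (PySem.List.pyGet? p 0).bind (fun px =>
     (PySem.List.pyGet? p 1).map (fun py =>
       solveAltCore ax ay bx b_y px py)))))))
    0

-- ===== PRECONDITION & SPEC =====
-- Python A raises IndexError when any of the three lists has fewer than two elements.
def Pre_solve (a : List Int) (b : List Int) (p : List Int) : Prop :=
  2 ≤ a.length ∧ 2 ≤ b.length ∧ 2 ≤ p.length
instance (a : List Int) (b : List Int) (p : List Int) : Decidable (Pre_solve a b p) := by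
  unfold Pre_solve; infer_instance
def pvWitness_solve : List Int × List Int × List Int := ([94, 34], [22, 67], [8400, 5400])

def Spec_solve (a : List Int) (b : List Int) (p : List Int) (out : Int) : Prop := out = solve_alt a b p
instance (a : List Int) (b : List Int) (p : List Int) (out : Int) : Decidable (Spec_solve a b p out) := by unfold Spec_solve; infer_instance

-- ===== CLAIM (what is proved, stated in full; the proofs are below) =====
def Claim_equal_solve : Prop := ∀ (a : List Int) (b : List Int) (p : List Int), Dom_solve a b p → Pre_solve a b p → Spec_solve a b p (solve a b p)

-- ===== LEMMAS AND PROOFS =====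

lemma two_le_cons {α : Type} (l : List α) (h : 2 ≤ l.length) : ∃ x y t, l = x :: y :: t := by
  cases l with
  | nil => simp at h
  | cons x t =>
    cases t with
    | nil => simp at h
    | cons y t' => exact ⟨x, y, t', rfl⟩

lemma R_eq : PySem.List.pyRange 0 101 1 = List.map (fun k : Nat => (k : Int)) (List.range 101) := by
  simpa using PySem.List.pyRange_one 0 101

lemma mem_R (j : Int) : j ∈ PySem.List.pyRange 0 101 1 ↔ 0 ≤ j ∧ j ≤ 100 := by
  rw [R_eq]
  constructor
  · intro h
    obtain ⟨k, hk, he⟩ := List.mem_map.mp h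
    have hk' : k < 101 := List.mem_range.mp hk
    omega
  · intro ⟨h0, h1⟩
    exact List.mem_map.mpr ⟨j.toNat, List.mem_range.mpr (by omega), by omega⟩

lemma nodup_R : (PySem.List.pyRange 0 101 1).Nodup := by
  rw [R_eq]
  exact List.Nodup.map (fun a b h => by exact_mod_cast h) List.nodup_range

lemma updA_min (s : Option Int) (c : Int) : ∃ m, updA s c = some m ∧ m ≤ c := by
  cases s with
  | none => exact ⟨c, rfl, le_refl c⟩
  | some m =>
    by_cases h : c < m
    · exact ⟨c, by simp [updA, h], le_refl c⟩
    · exact ⟨m, by simp [updA, h], by omega⟩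

lemma foldl_updA_of_min (cs : List Int) (m : Int) (h : ∀ c ∈ cs, m ≤ c) :
    cs.foldl updA (some m) = some m := by
  induction cs with
  | nil => rfl
  | cons c t ih =>
    have hmc : ¬ c < m := by have := h c (by simp); omega
    simp only [List.foldl_cons, updA, hmc, if_false]
    exact ih (fun c' hc' => h c' (by simp [hc']))

lemma foldl_updA_head (c₀ : Int) (cs : List Int) (s : Option Int) (h : ∀ c ∈ cs, c₀ ≤ c) :
    (c₀ :: cs).foldl updA s = updA s c₀ := by
  obtain ⟨m, hm, hle⟩ := updA_min s c₀
  simp only [List.foldl_cons, hm]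
  exact foldl_updA_of_min cs m (fun c hc => le_trans hle (h c hc))

lemma foldl_if_filter (P : Int → Prop) [DecidablePred P] (cost : Int → Int) :
    ∀ (l : List Int) (s : Option Int),
      l.foldl (fun s j => if P j then updA s (cost j) else s) s
        = ((l.filter (fun j => decide (P j))).map cost).foldl updA s := by
  intro l
  induction l with
  | nil => intro s; rfl
  | cons x t ih =>
    intro s
    by_cases h : P x <;> simp [h, ih]

lemma filter_nil_of_none (P : Int → Prop) [DecidablePred P] (l : List Int)
    (h : ∀ j ∈ l, ¬ P j) : l.filter (fun j => decide (P j)) = [] := by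
  simp only [List.filter_eq_nil_iff, decide_eq_true_eq]
  exact h

lemma filter_singleton_of_unique (P : Int → Prop) [DecidablePred P] (j₀ : Int) :
    ∀ (l : List Int), l.Nodup → j₀ ∈ l → (∀ j, P j ↔ j = j₀) →
      l.filter (fun j => decide (P j)) = [j₀] := by
  intro l
  induction l with
  | nil => intro _ hm; simp at hm
  | cons x t ih =>
    intro hnd hm hP
    rcases List.nodup_cons.mp hnd with ⟨hx, hndt⟩
    by_cases h : P x
    · have hxj : x = j₀ := (hP x).mp h
      subst hxj
      have : t.filter (fun j => decide (P j)) = [] :=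
        filter_nil_of_none P t (fun j hj hPj => hx (((hP j).mp hPj) ▸ hj))
      simp [h, this]
    · have hj0t : j₀ ∈ t := by
        rcases List.mem_cons.mp hm with h' | h'
        · exact absurd ((hP x).mpr h'.symm) h
        · exact h'
      simp [h, ih hndt hj0t hP]

lemma mod_zero_mul (r d : Int) (_hd : d ≠ 0) (h : PySem.Int.mod r d = 0) :
    (PySem.Int.floordiv r d) * d = r := by
  have := PySem.Int.floordiv_mul_add_mod r d
  omega

lemma stepB_eq (ax ay bx b_y px py : Int) (s : Option Int) (i : Int) :
    stepB ax ay bx b_y px py s i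
      = match candJ bx b_y (px - i * ax) (py - i * ay) with
        | some j => if 0 ≤ j ∧ j ≤ 100 ∧ j * bx = px - i * ax ∧ j * b_y = py - i * ay
                    then updA s (3 * i + j) else s
        | none => s := by
  have hBA : updB = updA := by
    funext s c
    cases s with
    | none => rfl
    | some m =>
      simp only [updB, updA, min_def]
      by_cases h : c < m <;> by_cases h' : m ≤ c <;> simp [h, h'] <;> omega
  unfold stepB
  rw [hBA]

lemma inner_eq (ax ay bx b_y px py i : Int) (s : Option Int) :
    (PySem.List.pyRange 0 101 1).foldl (fun s j =>
      if i * ax + j * bx = px ∧ i * ay + j * b_y = py then updA s (3 * i + j) else s) s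
      = stepB ax ay bx b_y px py s i := by
  have hP : ∀ j : Int, (i * ax + j * bx = px ∧ i * ay + j * b_y = py) ↔
      (j * bx = px - i * ax ∧ j * b_y = py - i * ay) := by
    intro j
    constructor <;> rintro ⟨h1, h2⟩ <;> exact ⟨by linarith, by linarith⟩
  rw [foldl_if_filter (fun j => i * ax + j * bx = px ∧ i * ay + j * b_y = py)
        (fun j => 3 * i + j)]
  rw [stepB_eq]
  by_cases hbx : bx = 0
  · by_cases hby : b_y = 0
    · -- bx = 0, b_y = 0 : every j is a hit iff the residuals vanish
      subst hbx hby
      have hc : candJ 0 0 (px - i * ax) (py - i * ay) = some 0 := by simp [candJ]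
      rw [hc]
      by_cases hr : px - i * ax = 0 ∧ py - i * ay = 0
      · have hfil : (PySem.List.pyRange 0 101 1).filter
            (fun j => decide (i * ax + j * 0 = px ∧ i * ay + j * 0 = py))
            = PySem.List.pyRange 0 101 1 := by
          apply List.filter_eq_self.mpr
          intro j _
          simp only [decide_eq_true_eq]
          exact (hP j).mpr ⟨by simp [hr.1], by simp [hr.2]⟩
        rw [hfil, PySem.List.pyRange_one_cons (by norm_num : (0:Int) < 101)]
        simp only [List.map_cons]
        rw [foldl_updA_head _ _ _ (by
          intro c hc'
          obtain ⟨j, hj, rfl⟩ := List.mem_map.mp hc'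
          have := (PySem.List.mem_pyRange_one).mp hj
          omega)]
        show _ = if (0:Int) ≤ 0 ∧ (0:Int) ≤ 100 ∧ (0:Int) * 0 = px - i * ax ∧
            (0:Int) * 0 = py - i * ay then updA s (3 * i + 0) else s
        rw [if_pos ⟨by norm_num, by norm_num, by simp [hr.1], by simp [hr.2]⟩]
      · have hfil : (PySem.List.pyRange 0 101 1).filter
            (fun j => decide (i * ax + j * 0 = px ∧ i * ay + j * 0 = py)) = [] := by
          apply filter_nil_of_none
          intro j _ hPj
          obtain ⟨h1, h2⟩ := (hP j).mp hPj
          rw [mul_zero] at h1 h2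
          exact hr ⟨h1.symm, h2.symm⟩
        rw [hfil]
        show _ = if (0:Int) ≤ 0 ∧ (0:Int) ≤ 100 ∧ (0:Int) * 0 = px - i * ax ∧
            (0:Int) * 0 = py - i * ay then updA s (3 * i + 0) else s
        rw [if_neg (by
          rintro ⟨_, _, h3, h4⟩
          rw [mul_zero] at h3 h4
          exact hr ⟨h3.symm, h4.symm⟩)]
        rfl
    · -- bx = 0, b_y ≠ 0 : j determined by the y-equation
      subst hbx
      by_cases hdvd : PySem.Int.mod (py - i * ay) b_y = 0
      · have hj0 : (PySem.Int.floordiv (py - i * ay) b_y) * b_y = py - i * ay :=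
          mod_zero_mul _ _ hby hdvd
        set j₀ := PySem.Int.floordiv (py - i * ay) b_y with hj₀def
        have hc : candJ 0 b_y (px - i * ax) (py - i * ay) = some j₀ := by
          simp [candJ, hby, hdvd, hj₀def]
        rw [hc]
        have huniq : ∀ j : Int, j * b_y = py - i * ay ↔ j = j₀ := by
          intro j
          constructor
          · intro h; exact mul_right_cancel₀ hby (h.trans hj0.symm)
          · rintro rfl; exact hj0
        by_cases hvalid : 0 ≤ j₀ ∧ j₀ ≤ 100 ∧ px - i * ax = 0
        · have hfil : (PySem.List.pyRange 0 101 1).filter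
              (fun j => decide (i * ax + j * 0 = px ∧ i * ay + j * b_y = py)) = [j₀] := by
            apply filter_singleton_of_unique _ j₀ _ nodup_R
              ((mem_R j₀).mpr ⟨hvalid.1, hvalid.2.1⟩)
            intro j
            rw [hP j]
            constructor
            · rintro ⟨_, h2⟩; exact (huniq j).mp h2
            · rintro rfl; exact ⟨by simp [hvalid.2.2], hj0⟩
          rw [hfil]
          show _ = if 0 ≤ j₀ ∧ j₀ ≤ 100 ∧ j₀ * 0 = px - i * ax ∧ j₀ * b_y = py - i * ay
              then updA s (3 * i + j₀) else s
          rw [if_pos ⟨hvalid.1, hvalid.2.1, by simp [hvalid.2.2], hj0⟩]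
          rfl
        · have hfil : (PySem.List.pyRange 0 101 1).filter
              (fun j => decide (i * ax + j * 0 = px ∧ i * ay + j * b_y = py)) = [] := by
            apply filter_nil_of_none
            intro j hj hPj
            obtain ⟨h1, h2⟩ := (hP j).mp hPj
            have hjj : j = j₀ := (huniq j).mp h2
            have hb := (mem_R j).mp hj
            rw [mul_zero] at h1
            exact hvalid ⟨hjj ▸ hb.1, hjj ▸ hb.2, h1.symm⟩
          rw [hfil]
          show _ = if 0 ≤ j₀ ∧ j₀ ≤ 100 ∧ j₀ * 0 = px - i * ax ∧ j₀ * b_y = py - i * ay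
              then updA s (3 * i + j₀) else s
          rw [if_neg (by
            rintro ⟨h1, h2, h3, _⟩
            rw [mul_zero] at h3
            exact hvalid ⟨h1, h2, h3.symm⟩)]
          rfl
      · have hc : candJ 0 b_y (px - i * ax) (py - i * ay) = none := by
          simp [candJ, hby, hdvd]
        have hfil : (PySem.List.pyRange 0 101 1).filter
            (fun j => decide (i * ax + j * 0 = px ∧ i * ay + j * b_y = py)) = [] := by
          apply filter_nil_of_none
          intro j _ hPj
          obtain ⟨_, h2⟩ := (hP j).mp hPj
          exact hdvd ((PySem.Int.mod_eq_zero_iff_dvd _ _).mpr ⟨j, by linarith⟩)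
        rw [hfil, hc]
        rfl
  · -- bx ≠ 0 : j determined by the x-equation
    by_cases hdvd : PySem.Int.mod (px - i * ax) bx = 0
    · have hj0 : (PySem.Int.floordiv (px - i * ax) bx) * bx = px - i * ax :=
        mod_zero_mul _ _ hbx hdvd
      set j₀ := PySem.Int.floordiv (px - i * ax) bx with hj₀def
      have hc : candJ bx b_y (px - i * ax) (py - i * ay) = some j₀ := by
        simp [candJ, hbx, hdvd, hj₀def]
      rw [hc]
      have huniq : ∀ j : Int, j * bx = px - i * ax ↔ j = j₀ := by
        intro j
        constructor
        · intro h; exact mul_right_cancel₀ hbx (h.trans hj0.symm)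
        · rintro rfl; exact hj0
      by_cases hvalid : 0 ≤ j₀ ∧ j₀ ≤ 100 ∧ j₀ * b_y = py - i * ay
      · have hfil : (PySem.List.pyRange 0 101 1).filter
            (fun j => decide (i * ax + j * bx = px ∧ i * ay + j * b_y = py)) = [j₀] := by
          apply filter_singleton_of_unique _ j₀ _ nodup_R
            ((mem_R j₀).mpr ⟨hvalid.1, hvalid.2.1⟩)
          intro j
          rw [hP j]
          constructor
          · rintro ⟨h1, _⟩; exact (huniq j).mp h1
          · rintro rfl; exact ⟨hj0, hvalid.2.2⟩
        rw [hfil]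
        show _ = if 0 ≤ j₀ ∧ j₀ ≤ 100 ∧ j₀ * bx = px - i * ax ∧ j₀ * b_y = py - i * ay
            then updA s (3 * i + j₀) else s
        rw [if_pos ⟨hvalid.1, hvalid.2.1, hj0, hvalid.2.2⟩]
        rfl
      · have hfil : (PySem.List.pyRange 0 101 1).filter
            (fun j => decide (i * ax + j * bx = px ∧ i * ay + j * b_y = py)) = [] := by
          apply filter_nil_of_none
          intro j hj hPj
          obtain ⟨h1, h2⟩ := (hP j).mp hPj
          have hjj : j = j₀ := (huniq j).mp h1
          have hb := (mem_R j).mp hj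
          exact hvalid ⟨hjj ▸ hb.1, hjj ▸ hb.2, hjj ▸ h2⟩
        rw [hfil]
        show _ = if 0 ≤ j₀ ∧ j₀ ≤ 100 ∧ j₀ * bx = px - i * ax ∧ j₀ * b_y = py - i * ay
            then updA s (3 * i + j₀) else s
        rw [if_neg (by
          rintro ⟨h1, h2, _, h4⟩
          exact hvalid ⟨h1, h2, h4⟩)]
        rfl
    · have hc : candJ bx b_y (px - i * ax) (py - i * ay) = none := by
        simp [candJ, hbx, hdvd]
      have hfil : (PySem.List.pyRange 0 101 1).filter
          (fun j => decide (i * ax + j * bx = px ∧ i * ay + j * b_y = py)) = [] := by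
        apply filter_nil_of_none
        intro j _ hPj
        obtain ⟨h1, _⟩ := (hP j).mp hPj
        exact hdvd ((PySem.Int.mod_eq_zero_iff_dvd _ _).mpr ⟨j, by linarith⟩)
      rw [hfil, hc]
      rfl

theorem core_eq (ax ay bx b_y px py : Int) :
    solveCore ax ay bx b_y px py = solveAltCore ax ay bx b_y px py := by
  unfold solveCore solveAltCore
  have hf : (fun (s : Option Int) (i : Int) =>
      (PySem.List.pyRange 0 101 1).foldl (fun s j =>
        if i * ax + j * bx = px ∧ i * ay + j * b_y = py then updA s (3 * i + j) else s) s)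
      = stepB ax ay bx b_y px py := by
    funext s i
    exact inner_eq ax ay bx b_y px py i s
  rw [hf]

-- ===== VERDICT (by name: the statement is the Claim_ definition above) =====
theorem solve_spec : Claim_equal_solve := by
  intro a b p _ hpre
  obtain ⟨ha, hb, hp⟩ := hpre
  obtain ⟨ax, ay, ta, rfl⟩ := two_le_cons a ha
  obtain ⟨bx, b_y, tb, rfl⟩ := two_le_cons b hb
  obtain ⟨px, py, tp, rfl⟩ := two_le_cons p hp
  have g0 : ∀ (x y : Int) (t : List Int), PySem.List.pyGet? (x :: y :: t) 0 = some x := by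
    intro x y t
    rw [show (0:Int) = ((0:Nat):Int) by norm_num, PySem.List.pyGet?_natCast]; rfl
  have g1 : ∀ (x y : Int) (t : List Int), PySem.List.pyGet? (x :: y :: t) 1 = some y := by
    intro x y t
    rw [show (1:Int) = ((1:Nat):Int) by norm_num, PySem.List.pyGet?_natCast]; rfl
  unfold Spec_solve
  simp only [solve, solve_alt, g0, g1]
  exact core_eq ax ay bx b_y px py
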